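-- pv_equiv track=rewrite | github.com/ohilikeit/Coding_Test_Practice | 프로그래머스/lv2/87390. n＾2 배열 자르기/n＾2 배열 자르기.py | solution
-- ===== SOURCE A (Python) =====
-- def solution(n, left, right):
--     a = left // n
--     c = right // n
--     b = left % n
--     d = right % n
--
--     lst = []
--     if c - a == 0:
--         for i in range(b, d+1):
--             lst.append((a, i))
--     else:
--         if c - a == 1:
--             for i in range(b, n):
--                 lst.append((a, i))
--             for j in range(0, d+1):
--                 lst.append((c, j))
--         elif c - a > 1:
--             for i in range(b, n):
--                 lst.append((a, i))
--             for k in range(a+1, c):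
--                 for l in range(n):
--                     lst.append((k, l))
--             for j in range(0, d+1):
--                 lst.append((c, j))
--
--     answer = [max(i)+1 for i in lst]
--
--     return answer
-- ===== SOURCE B (Python) =====
-- def solution(n, left, right):
--     return [max(i // n, i % n) + 1 for i in range(left, right + 1)]
-- ===== Notes on version B (the rewrite author's own statement) =====
-- stated objective: simpler
-- what changed: B replaces A's four-way row-block case analysis (same-row / adjacent rows / full middle rows) and the intermediate list of (row,col) pairs with a single comprehension over the flat indices left..right, computing each cell directly as max(i//n, i%n)+1.
-- outside the precondition, e.g. on solution(-2, 0, 3): A returns [], B returns [1, 0, 1, 0]; on solution(0, 0, 0): A raises ZeroDivisionError, B raises ZeroDivisionError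
import Mathlib
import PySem

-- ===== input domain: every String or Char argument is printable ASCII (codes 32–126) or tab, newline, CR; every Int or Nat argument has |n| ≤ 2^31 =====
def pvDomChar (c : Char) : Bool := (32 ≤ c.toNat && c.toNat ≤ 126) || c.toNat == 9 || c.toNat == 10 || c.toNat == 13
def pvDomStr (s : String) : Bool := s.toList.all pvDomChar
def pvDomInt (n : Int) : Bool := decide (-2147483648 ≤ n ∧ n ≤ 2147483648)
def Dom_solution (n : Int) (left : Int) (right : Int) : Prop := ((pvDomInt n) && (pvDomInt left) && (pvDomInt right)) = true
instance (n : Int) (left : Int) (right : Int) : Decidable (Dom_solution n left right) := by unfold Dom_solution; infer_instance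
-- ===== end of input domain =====

-- B replaces A's row-block case analysis with one pass over the flat index range (simpler decomposition; same outputs).


-- ===== PORT A =====
def solution (n : Int) (left : Int) (right : Int) : List Int :=
  let a := PySem.Int.floordiv left n
  let c := PySem.Int.floordiv right n
  let b := PySem.Int.mod left n
  let d := PySem.Int.mod right n
  let lst : List (Int × Int) :=
    if c - a = 0 then
      (PySem.List.pyRange b (d + 1) 1).foldl (fun acc i => acc ++ [(a, i)]) []
    else
      if c - a = 1 then
        let lst1 := (PySem.List.pyRange b n 1).foldl (fun acc i => acc ++ [(a, i)]) []
        (PySem.List.pyRange 0 (d + 1) 1).foldl (fun acc j => acc ++ [(c, j)]) lst1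
      else if c - a > 1 then
        let lst1 := (PySem.List.pyRange b n 1).foldl (fun acc i => acc ++ [(a, i)]) []
        let lst2 := (PySem.List.pyRange (a + 1) c 1).foldl
          (fun acc k => (PySem.List.pyRange 0 n 1).foldl (fun acc2 l => acc2 ++ [(k, l)]) acc) lst1
        (PySem.List.pyRange 0 (d + 1) 1).foldl (fun acc j => acc ++ [(c, j)]) lst2
      else []
  lst.map (fun i => max i.1 i.2 + 1)

-- ===== PORT B =====
def solution_alt (n : Int) (left : Int) (right : Int) : List Int :=
  (PySem.List.pyRange left (right + 1) 1).map
    (fun i => max (PySem.Int.floordiv i n) (PySem.Int.mod i n) + 1)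

-- ===== PRECONDITION & SPEC =====
-- Pre_ excludes n ≤ 0: at n = 0 both programs raise ZeroDivisionError, and for negative n the
-- "n x n array" is meaningless, so A's returned value there is an artefact of its row-block arithmetic.
def Pre_solution (n : Int) (left : Int) (right : Int) : Prop := 1 ≤ n
instance (n : Int) (left : Int) (right : Int) : Decidable (Pre_solution n left right) := by
  unfold Pre_solution; infer_instance

def pvWitness_solution : Int × Int × Int := (3, 2, 5)

def Spec_solution (n : Int) (left : Int) (right : Int) (out : List Int) : Prop := out = solution_alt n left right
instance (n : Int) (left : Int) (right : Int) (out : List Int) : Decidable (Spec_solution n left right out) := by unfold Spec_solution; infer_instance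

-- ===== CLAIM (what is proved, stated in full; the proofs are below) =====
def Claim_equal_solution : Prop := ∀ (n : Int) (left : Int) (right : Int), Dom_solution n left right → Pre_solution n left right → Spec_solution n left right (solution n left right)

-- ===== LEMMAS AND PROOFS =====

-- A cell of row k, column j (0 ≤ j < n) has flat index k*n + j.
theorem pv_cell (n k j : Int) (hn : 1 ≤ n) (h0 : 0 ≤ j) (hj : j < n) :
    PySem.Int.floordiv (k * n + j) n = k ∧ PySem.Int.mod (k * n + j) n = j := by
  have hfd : PySem.Int.floordiv (k * n + j) n = k := by
    rw [PySem.Int.floordiv_eq_iff_of_pos (by omega)]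
    constructor <;> nlinarith
  refine ⟨hfd, ?_⟩
  have := PySem.Int.floordiv_mul_add_mod (k * n + j) n
  rw [hfd] at this; omega

-- One row block of A's pair list, rewritten as a map over its flat indices.
theorem pv_row (n k lo hi : Int) (hn : 1 ≤ n) (hlo : 0 ≤ lo) (hhi : hi ≤ n) :
    (PySem.List.pyRange lo hi 1).map (Prod.mk k) =
    (PySem.List.pyRange (k * n + lo) (k * n + hi) 1).map
      (fun i => (PySem.Int.floordiv i n, PySem.Int.mod i n)) := by
  rw [PySem.List.pyRange_one lo hi, PySem.List.pyRange_one (k * n + lo) (k * n + hi)]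
  have he : k * n + hi - (k * n + lo) = hi - lo := by ring
  rw [he]
  simp only [List.map_map]
  apply List.map_congr_left
  intro t ht
  rw [List.mem_range] at ht
  have hlt : lo + (t : Int) < hi := by omega
  have harg : k * n + lo + (t : Int) = k * n + (lo + t) := by ring
  have := pv_cell n k (lo + t) hn (by omega) (by omega)
  simp only [Function.comp_def, harg, this.1, this.2]

-- The full middle rows p, p+1, …, p+m-1, as a map over their flat indices.
theorem pv_mid (n : Int) (hn : 1 ≤ n) (m : Nat) : ∀ p : Int,
    (PySem.List.pyRange p (p + m) 1).flatMap
      (fun k => (PySem.List.pyRange 0 n 1).map (Prod.mk k)) =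
    (PySem.List.pyRange (p * n) ((p + m) * n) 1).map
      (fun i => (PySem.Int.floordiv i n, PySem.Int.mod i n)) := by
  induction m with
  | zero =>
    intro p
    simp only [Nat.cast_zero, add_zero]
    simp [PySem.List.pyRange_one_eq_nil (le_refl p), PySem.List.pyRange_one_eq_nil (le_refl (p * n))]
  | succ m ih =>
    intro p
    have hcons : PySem.List.pyRange p (p + (m + 1 : Nat)) 1 =
        p :: PySem.List.pyRange (p + 1) (p + (m + 1 : Nat)) 1 :=
      PySem.List.pyRange_one_cons (by push_cast; omega)
    rw [hcons, List.flatMap_cons]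
    have h1 : (p : Int) + (m + 1 : Nat) = (p + 1) + m := by push_cast; ring
    rw [h1, ih (p + 1), pv_row n p 0 n hn le_rfl le_rfl]
    have h2 : p * n + 0 = p * n := by ring
    have h3 : p * n + n = (p + 1) * n := by ring
    rw [h2, h3]
    have hsplit : PySem.List.pyRange (p * n) (((p + 1) + m) * n) 1 =
        PySem.List.pyRange (p * n) ((p + 1) * n) 1 ++
        PySem.List.pyRange ((p + 1) * n) (((p + 1) + m) * n) 1 :=
      PySem.List.pyRange_one_append _ _ _ (by nlinarith) (by nlinarith [Int.natCast_nonneg m])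
    rw [hsplit, List.map_append]

-- floordiv by a positive divisor is monotone.
theorem pv_fd_mono (n x y : Int) (hn : 1 ≤ n) (h : x ≤ y) :
    PySem.Int.floordiv x n ≤ PySem.Int.floordiv y n := by
  rw [PySem.Int.floordiv_eq_ediv_of_pos (by omega), PySem.Int.floordiv_eq_ediv_of_pos (by omega)]
  exact Int.ediv_le_ediv (by omega) h

theorem solution_eq_alt (n left right : Int) (hn : 1 ≤ n) :
    solution n left right = solution_alt n left right := by
  unfold solution solution_alt
  dsimp only
  set a := PySem.Int.floordiv left n with ha
  set c := PySem.Int.floordiv right n with hc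
  set b := PySem.Int.mod left n with hb
  set d := PySem.Int.mod right n with hd
  have hL : a * n + b = left := PySem.Int.floordiv_mul_add_mod left n
  have hR : c * n + d = right := PySem.Int.floordiv_mul_add_mod right n
  have hb0 : 0 ≤ b := PySem.Int.mod_nonneg left (by omega)
  have hbn : b < n := PySem.Int.mod_lt left (by omega)
  have hd0 : 0 ≤ d := PySem.Int.mod_nonneg right (by omega)
  have hdn : d < n := PySem.Int.mod_lt right (by omega)
  by_cases h0 : c - a = 0
  · -- one row
    rw [if_pos h0]
    simp only [PySem.List.foldl_append_singleton_eq_map, List.nil_append]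
    rw [pv_row n a b (d + 1) hn hb0 (by omega)]
    have hac : a * n = c * n := by rw [(by omega : a = c)]
    have he : a * n + (d + 1) = right + 1 := by omega
    rw [hL, he]
    simp [List.map_map, Function.comp_def]
  · rw [if_neg h0]
    by_cases h1 : c - a = 1
    · -- two adjacent rows
      rw [if_pos h1]
      simp only [PySem.List.foldl_append_singleton_eq_map, List.nil_append]
      rw [pv_row n a b n hn hb0 le_rfl, pv_row n c 0 (d + 1) hn le_rfl (by omega)]
      have hcn : c * n + 0 = a * n + n := by rw [(by omega : c = a + 1)]; ring
      have he : c * n + (d + 1) = right + 1 := by omega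
      rw [he, hcn, ← hL]
      have hsplit : PySem.List.pyRange (a * n + b) (right + 1) 1 =
          PySem.List.pyRange (a * n + b) (a * n + n) 1 ++
          PySem.List.pyRange (a * n + n) (right + 1) 1 :=
        PySem.List.pyRange_one_append _ _ _ (by omega) (by omega)
      rw [hsplit]
      simp [List.map_append, List.map_map, Function.comp_def]
    · rw [if_neg h1]
      by_cases h2 : c - a > 1
      · -- first row, full middle rows, last row
        rw [if_pos h2]
        simp only [PySem.List.foldl_append_singleton_eq_map, List.nil_append,
          PySem.List.foldl_append_eq_flatMap]
        set m : Nat := (c - (a + 1)).toNat with hm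
        have hcm : c = (a + 1) + (m : Int) := by omega
        rw [hcm, pv_mid n hn m (a + 1),
            pv_row n a b n hn hb0 le_rfl, pv_row n ((a + 1) + (m : Int)) 0 (d + 1) hn le_rfl (by omega)]
        have f1 : a * n + n = (a + 1) * n := by ring
        have f2 : ((a + 1) + (m : Int)) * n = c * n := by rw [hcm]
        have f3 : ((a + 1) + (m : Int)) * n + 0 = c * n := by rw [hcm]; ring
        have f4 : ((a + 1) + (m : Int)) * n + (d + 1) = c * n + (d + 1) := by rw [hcm]
        have he : c * n + (d + 1) = right + 1 := by omega
        rw [f3, f4, he, f2, f1, ← hL]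
        have f5 : c * n = (a + 1) * n + (m : Int) * n := by rw [hcm]; ring
        have f6 : 0 ≤ (m : Int) * n := mul_nonneg (Int.natCast_nonneg m) (by omega)
        have hs1 : a * n + b ≤ (a + 1) * n := by omega
        have hs2 : (a + 1) * n ≤ c * n := by omega
        have hs3 : c * n ≤ right + 1 := by omega
        have hsplit : PySem.List.pyRange (a * n + b) (right + 1) 1 =
            (PySem.List.pyRange (a * n + b) ((a + 1) * n) 1 ++
             PySem.List.pyRange ((a + 1) * n) (c * n) 1) ++
            PySem.List.pyRange (c * n) (right + 1) 1 := by
          rw [← PySem.List.pyRange_one_append _ _ _ hs1 hs2,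
              ← PySem.List.pyRange_one_append _ _ _ (le_trans hs1 hs2) hs3]
        rw [hsplit]
        simp [List.map_append, List.map_map, Function.comp_def, List.append_assoc]
      · -- c < a: the slice is empty on both sides
        rw [if_neg h2]
        have hrl : right < left := by
          by_contra hcon
          have := pv_fd_mono n left right hn (by omega)
          rw [← ha, ← hc] at this; omega
        rw [PySem.List.pyRange_one_eq_nil (by omega)]
        simp

-- ===== VERDICT (by name: the statement is the Claim_ definition above) =====
theorem solution_spec : Claim_equal_solution := by
  intro n left right _ hpre
  exact solution_eq_alt n left right hpre
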